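-- pv_equiv track=rewrite | github.com/chobeat/mapredush | TFIDF/TFIDF.py | docToTF
-- ===== SOURCE A (Python) =====
-- import string
--
-- def docToTF(doc):
-- 	valid_chars = " %s%s" % (string.ascii_letters, string.digits)
-- 	doc=''.join(c for c in doc if c in valid_chars)
-- 	words=doc.split(" ")
-- 	TF={}
-- 	for word in words:
-- 		TF[word]=TF.setdefault(word,0)+1
-- 	return TF
-- ===== SOURCE B (Python) =====
-- import string
--
-- WORD_CHARS = set(string.ascii_letters + string.digits)
--
-- def docToTF(doc):
--     TF = {}
--     cur = ''
--     for c in doc: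
--         if c == ' ':
--             TF[cur] = TF.get(cur, 0) + 1
--             cur = ''
--         elif c in WORD_CHARS:
--             cur += c
--     TF[cur] = TF.get(cur, 0) + 1
--     return TF
-- ===== Notes on version B (the rewrite author's own statement) =====
-- stated objective: alternative
-- what changed: B replaces A three passes (filter-join to a new string, then a space-separated split, then a counting loop over the word list) with a single streaming pass over the characters that maintains the current word buffer and updates the count dict whenever a space ends a word.
import Mathlib
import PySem

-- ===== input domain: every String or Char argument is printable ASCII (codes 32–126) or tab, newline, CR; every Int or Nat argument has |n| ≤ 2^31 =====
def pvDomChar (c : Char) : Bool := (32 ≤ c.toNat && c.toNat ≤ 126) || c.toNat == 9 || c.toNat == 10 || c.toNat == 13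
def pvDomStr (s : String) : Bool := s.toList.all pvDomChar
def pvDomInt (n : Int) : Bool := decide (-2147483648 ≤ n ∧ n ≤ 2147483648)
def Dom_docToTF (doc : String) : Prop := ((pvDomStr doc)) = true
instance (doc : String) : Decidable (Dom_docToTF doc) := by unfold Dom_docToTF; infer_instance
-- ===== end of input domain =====

-- B replaces A's filter-then-split-then-count passes with one streaming tokenizer pass
-- keeping a current-word buffer and the count dict; alternative decomposition, same cost.

-- ===== PORT A =====
-- valid_chars = " %s%s" % (string.ascii_letters, string.digits); 'c in valid_chars' is membership in these chars
def pvValidChars : List Char :=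
  " abcdefghijklmnopqrstuvwxyzABCDEFGHIJKLMNOPQRSTUVWXYZ0123456789".toList

def docToTF (doc : String) : List (String × Int) :=
  -- doc = ''.join(c for c in doc if c in valid_chars)
  let filtered := doc.toList.filter (fun c => pvValidChars.contains c)
  -- words = doc.split(" ")
  let words := (PySem.Chars.splitOn filtered [' ']).map String.ofList
  -- for word in words: TF[word] = TF.setdefault(word, 0) + 1
  let TF := words.foldl
    (fun (d : PySem.Dict String Int) w =>
      let d' := d.setdefault w 0
      d'.insert w (d'.getD w 0 + 1))
    PySem.Dict.empty
  TF.items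

-- ===== PORT B =====
-- WORD_CHARS = set(string.ascii_letters + string.digits)  (a fixed literal set of chars)
def pvWordChars : List Char :=
  "abcdefghijklmnopqrstuvwxyzABCDEFGHIJKLMNOPQRSTUVWXYZ0123456789".toList

-- one loop iteration of Source B: state = (TF, cur)
def pvAltStep (st : PySem.Dict String Int × List Char) (c : Char) :
    PySem.Dict String Int × List Char :=
  if c == ' ' then
    (st.1.insert (String.ofList st.2) (st.1.getD (String.ofList st.2) 0 + 1), [])
  else if pvWordChars.contains c then (st.1, st.2 ++ [c])
  else st

def docToTF_alt (doc : String) : List (String × Int) :=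
  let st := doc.toList.foldl pvAltStep (PySem.Dict.empty, [])
  -- final TF[cur] = TF.get(cur, 0) + 1
  (st.1.insert (String.ofList st.2) (st.1.getD (String.ofList st.2) 0 + 1)).items

-- ===== PRECONDITION & SPEC =====
def Spec_docToTF (doc : String) (out : List (String × Int)) : Prop := out = docToTF_alt doc
instance (doc : String) (out : List (String × Int)) : Decidable (Spec_docToTF doc out) := by unfold Spec_docToTF; infer_instance

-- ===== CLAIM (what is proved, stated in full; the proofs are below) =====
def Claim_equal_docToTF : Prop := ∀ (doc : String), Dom_docToTF doc → Spec_docToTF doc (docToTF doc)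

-- ===== LEMMAS AND PROOFS =====

-- record one word into the count dict (B's update; equal to A's, see pvRecA_eq)
def pvRec (d : PySem.Dict String Int) (w : List Char) : PySem.Dict String Int :=
  d.insert (String.ofList w) (d.getD (String.ofList w) 0 + 1)

theorem pvRec_def (d : PySem.Dict String Int) (w : List Char) :
    d.insert (String.ofList w) (d.getD (String.ofList w) 0 + 1) = pvRec d w := rfl

-- structural split-on-single-space
def pvSplitSp : List Char → List (List Char)
  | [] => [[]]
  | c :: t => if c = ' ' then [] :: pvSplitSp t
              else match pvSplitSp t with
                   | [] => [[c]]
                   | w :: ws => (c :: w) :: ws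

def pvConsHead (p : List Char) : List (List Char) → List (List Char)
  | [] => [p]
  | w :: ws => (p ++ w) :: ws

theorem pvSplitSp_ne_nil (l : List Char) : pvSplitSp l ≠ [] := by
  induction l with
  | nil => simp [pvSplitSp]
  | cons c t ih =>
    simp only [pvSplitSp]
    split
    · simp
    · cases h : pvSplitSp t with
      | nil => simp
      | cons w ws => simp

theorem pvConsHead_nil (ws : List (List Char)) (h : ws ≠ []) : pvConsHead [] ws = ws := by
  cases ws with
  | nil => exact absurd rfl h
  | cons w ws => simp [pvConsHead]

theorem pvSplitSp_cons_space (l : List Char) : pvSplitSp (' ' :: l) = [] :: pvSplitSp l := by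
  simp [pvSplitSp]

theorem pvSplitSp_cons_ne (c : Char) (l : List Char) (hc : ¬ c = ' ')
    (w : List Char) (ws : List (List Char)) (h : pvSplitSp l = w :: ws) :
    pvSplitSp (c :: l) = (c :: w) :: ws := by
  simp only [pvSplitSp, if_neg hc, h]

-- characterization of PySem.Chars.splitOn.go with a single-char separator
theorem pvGo_eq (l : List Char) : ∀ (fuel : Nat) (cur : List Char) (acc : List (List Char)),
    l.length ≤ fuel →
    PySem.Chars.splitOn.go [' '] fuel l cur acc
      = acc.reverse ++ pvConsHead cur.reverse (pvSplitSp l) := by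
  induction l with
  | nil =>
    intro fuel cur acc _
    cases fuel <;> simp [PySem.Chars.splitOn.go, pvSplitSp, pvConsHead]
  | cons c t ih =>
    intro fuel cur acc hf
    cases fuel with
    | zero => simp at hf
    | succ f =>
      by_cases hc : c = ' '
      · subst hc
        have hpre : List.isPrefixOf [' '] (' ' :: t) = true := by
          simp [List.isPrefixOf]
        simp only [PySem.Chars.splitOn.go, hpre, if_pos]
        rw [show List.drop [' '].length (' ' :: t) = t from rfl]
        rw [ih f [] (cur.reverse :: acc) (by simpa using Nat.le_of_succ_le_succ hf)]
        rw [pvSplitSp_cons_space t]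
        rw [List.reverse_nil, pvConsHead_nil _ (pvSplitSp_ne_nil t)]
        cases hs : pvSplitSp t with
        | nil => exact absurd hs (pvSplitSp_ne_nil t)
        | cons w ws => simp [pvConsHead]
      · have hpre : List.isPrefixOf [' '] (c :: t) = false := by
          simp [List.isPrefixOf]
          exact fun hh => absurd hh.symm hc
        simp only [PySem.Chars.splitOn.go, hpre, Bool.false_eq_true, if_false]
        rw [ih f (c :: cur) acc (by simpa using Nat.le_of_succ_le_succ hf)]
        cases h : pvSplitSp t with
        | nil => exact absurd h (pvSplitSp_ne_nil t)
        | cons w ws =>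
          rw [pvSplitSp_cons_ne c t hc w ws h]
          simp [pvConsHead, List.reverse_cons]

theorem pvSplitOn_eq (l : List Char) :
    PySem.Chars.splitOn l [' '] = pvSplitSp l := by
  unfold PySem.Chars.splitOn
  rw [pvGo_eq l (l.length + 1) [] [] (Nat.le_succ _)]
  simp [pvConsHead_nil _ (pvSplitSp_ne_nil l)]

-- A's setdefault-then-assign equals B's direct counting insert
theorem pvRecA_eq (d : PySem.Dict String Int) (w : String) :
    (d.setdefault w 0).insert w ((d.setdefault w 0).getD w 0 + 1)
      = d.insert w (d.getD w 0 + 1) := by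
  by_cases h : d.contains w = true
  · simp [PySem.Dict.setdefault, h]
  · have hall : ∀ p ∈ d.items, (p.1 == w) = false := by
      intro p hp
      cases hbe : (p.1 == w) with
      | false => rfl
      | true => exact absurd (List.any_eq_true.mpr ⟨p, hp, hbe⟩) h
    have hfind : d.items.find? (fun p => p.1 == w) = none :=
      List.find?_eq_none.mpr (fun p hp => by simp [hall p hp])
    have hget : d.getD w 0 = 0 := by
      simp [PySem.Dict.getD, PySem.Dict.get?, hfind]
    have hcontains' : (PySem.Dict.mk (d.items ++ [(w, (0 : Int))])).contains w = true := by
      simp [PySem.Dict.contains]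
    have hfind' : (d.items ++ [(w, (0 : Int))]).find? (fun p => p.1 == w) = some (w, 0) := by
      rw [List.find?_append, hfind]
      simp
    have hget' : (PySem.Dict.mk (d.items ++ [(w, (0 : Int))])).getD w 0 = 0 := by
      simp [PySem.Dict.getD, PySem.Dict.get?, hfind']
    simp only [PySem.Dict.setdefault, h, Bool.false_eq_true, if_false]
    simp only [PySem.Dict.insert, h, hcontains', if_true, Bool.false_eq_true, if_false,
      hget, hget']
    congr 1
    rw [List.map_append]
    have h1 : d.items.map (fun p => if (p.1 == w) = true then (w, (0 : Int) + 1) else p)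
        = d.items := by
      conv_rhs => rw [← List.map_id d.items]
      exact List.map_congr_left (fun p hp => by simp [hall p hp])
    rw [h1]
    simp

-- counting a word list (shared shape of both sides after pvRecA_eq)
def pvCountW (d : PySem.Dict String Int) (ws : List (List Char)) : PySem.Dict String Int :=
  ws.foldl pvRec d

theorem pvCountW_consHead_cons (d : PySem.Dict String Int) (cur : List Char)
    (ws : List (List Char)) (h : ws ≠ []) :
    pvCountW d (pvConsHead cur ([] :: ws)) = pvCountW (pvRec d cur) ws := by
  cases ws with
  | nil => exact absurd rfl h
  | cons w ws' => simp [pvConsHead, pvCountW]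

-- the streaming-loop invariant: flushing the buffer after the fold counts exactly
-- the words of the filtered-and-split suffix, with cur glued onto the first one
theorem pvLoop_eq (l : List Char) : ∀ (d : PySem.Dict String Int) (cur : List Char),
    pvRec (l.foldl pvAltStep (d, cur)).1 (l.foldl pvAltStep (d, cur)).2
      = pvCountW d (pvConsHead cur
          (pvSplitSp (l.filter (fun c => pvValidChars.contains c)))) := by
  induction l with
  | nil =>
    intro d cur
    simp [pvSplitSp, pvConsHead, pvCountW]
  | cons c t ih =>
    intro d cur
    by_cases hsp : c = ' '
    · subst hsp
      have hv : pvValidChars.contains ' ' = true := by decide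
      simp only [List.foldl_cons, List.filter_cons, hv, if_pos]
      rw [show pvAltStep (d, cur) ' ' = (pvRec d cur, []) from by
        simp [pvAltStep, pvRec]]
      rw [ih (pvRec d cur) []]
      rw [pvSplitSp_cons_space (List.filter (fun c => pvValidChars.contains c) t)]
      rw [pvConsHead_nil _ (pvSplitSp_ne_nil _)]
      rw [pvCountW_consHead_cons d cur _ (pvSplitSp_ne_nil _)]
    · cases hw : pvWordChars.contains c with
      | true =>
        have hv : pvValidChars.contains c = true := by
          have he : pvValidChars = ' ' :: pvWordChars := by decide
          rw [he, List.contains_cons, hw, Bool.or_true]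
        simp only [List.foldl_cons, List.filter_cons, hv, if_pos]
        rw [show pvAltStep (d, cur) c = (d, cur ++ [c]) from by
          simp only [pvAltStep]
          rw [if_neg (by simp [hsp]), if_pos hw]]
        rw [ih d (cur ++ [c])]
        cases h : pvSplitSp (t.filter (fun c => pvValidChars.contains c)) with
        | nil => exact absurd h (pvSplitSp_ne_nil _)
        | cons w ws =>
          rw [pvSplitSp_cons_ne c _ hsp w ws h]
          simp [pvConsHead]
      | false =>
        have hv : pvValidChars.contains c = false := by
          have he : pvValidChars = ' ' :: pvWordChars := by decide
          rw [he, List.contains_cons, hw, Bool.or_false]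
          simp [hsp]
        simp only [List.foldl_cons, List.filter_cons, hv, Bool.false_eq_true, if_false]
        rw [show pvAltStep (d, cur) c = (d, cur) from by
          simp only [pvAltStep]
          rw [if_neg (by simp [hsp]), if_neg (by rw [hw]; exact Bool.false_ne_true)]]
        exact ih d cur

-- fold over A's String-mapped word list = pvCountW over the char-list words
theorem pvFoldA_eq (ws : List (List Char)) : ∀ d : PySem.Dict String Int,
    (ws.map String.ofList).foldl
      (fun (d : PySem.Dict String Int) w =>
        (d.setdefault w 0).insert w ((d.setdefault w 0).getD w 0 + 1)) d
      = pvCountW d ws := by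
  induction ws with
  | nil => intro d; simp [pvCountW]
  | cons w ws ih =>
    intro d
    simp only [List.map_cons, List.foldl_cons, pvCountW]
    rw [pvRecA_eq d (String.ofList w)]
    exact ih (pvRec d w)

-- ===== VERDICT (by name: the statement is the Claim_ definition above) =====
theorem docToTF_spec : Claim_equal_docToTF := by
  intro doc _
  show docToTF doc = docToTF_alt doc
  simp only [docToTF, docToTF_alt, pvSplitOn_eq, pvRec_def, pvFoldA_eq]
  rw [pvLoop_eq doc.toList PySem.Dict.empty []]
  rw [pvConsHead_nil _ (pvSplitSp_ne_nil _)]
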